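-- pv_equiv track=rewrite | github.com/MrBrantCode/unitest_baseline | mut_generate/mist_train_cf/cf_10156/solution.py | sort_unique_values
-- ===== SOURCE A (Python) =====
-- def sort_unique_values(dataset):
--     """
--     Returns a list of unique values in descending order based on their frequency of occurrence in the dataset.
--     If two values have the same frequency, they are returned in ascending alphabetical order.
--
--     Args:
--         dataset (list): A 2D list where each sublist contains a value and a number.
--
--     Returns:
--         list: A list of unique values in descending order based on frequency.
--     """
--     frequency_dict = {}
--     for item in dataset:
--         value = item[0]
--         if value in frequency_dict:
--             frequency_dict[value] += 1
--         else:
--             frequency_dict[value] = 1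
--
--     sorted_keys = sorted(frequency_dict.keys(), key=lambda k: (-frequency_dict[k], k))
--     return sorted_keys
-- ===== SOURCE B (Python) =====
-- def sort_unique_values(dataset):
--     freq = {}
--     for item in dataset:
--         v = item[0]
--         freq[v] = freq.get(v, 0) + 1
--     buckets = {}
--     for v, c in freq.items():
--         buckets.setdefault(c, []).append(v)
--     result = []
--     for c in sorted(buckets, reverse=True):
--         result.extend(sorted(buckets[c]))
--     return result
-- ===== Notes on version B (the rewrite author's own statement) =====
-- stated objective: alternative
-- what changed: Instead of sorting the distinct values by a composite key (-frequency, value), B inverts the frequency counter into buckets keyed by count and concatenates each alphabetically-sorted bucket in descending count order.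
import Mathlib
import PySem

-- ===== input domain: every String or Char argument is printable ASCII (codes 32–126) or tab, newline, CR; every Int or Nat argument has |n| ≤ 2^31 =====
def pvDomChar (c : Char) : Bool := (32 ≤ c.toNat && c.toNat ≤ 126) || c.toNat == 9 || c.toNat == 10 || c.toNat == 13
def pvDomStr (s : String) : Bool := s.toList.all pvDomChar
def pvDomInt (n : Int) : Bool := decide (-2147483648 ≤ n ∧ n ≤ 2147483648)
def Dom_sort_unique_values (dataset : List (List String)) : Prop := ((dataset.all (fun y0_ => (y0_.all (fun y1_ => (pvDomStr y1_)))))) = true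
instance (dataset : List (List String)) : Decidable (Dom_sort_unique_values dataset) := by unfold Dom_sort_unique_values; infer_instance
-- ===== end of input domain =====

-- B replaces A's composite-key sort ((-freq, value)) by inverting the counter into
-- frequency buckets and emitting each bucket (alphabetically sorted) in descending
-- count order: an alternative decomposition, same exact output.

-- ===== PORT A =====
-- item[0] is ported as PySem.List.pyGetD item 0 "" — exact whenever item ≠ [] (guaranteed by Pre_;
-- on an empty row Python raises IndexError).  frequency_dict[value] (resp. frequency_dict[k] in the
-- sort key) is ported as getD _ 0 — exact because it is only reached when the key is present.
def sort_unique_values (dataset : List (List String)) : List String :=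
  let frequency_dict : PySem.Dict String Int :=
    dataset.foldl (fun d item =>
      if d.contains (PySem.List.pyGetD item 0 "") then
        d.insert (PySem.List.pyGetD item 0 "") (d.getD (PySem.List.pyGetD item 0 "") 0 + 1)
      else
        d.insert (PySem.List.pyGetD item 0 "") 1) PySem.Dict.empty
  PySem.List.sorted2 frequency_dict.keys (fun k => -(frequency_dict.getD k 0)) (fun k => k)

-- ===== PORT B =====
-- Same pyGetD/getD conventions as port A (exact under Pre_ / when the key is present).
def sort_unique_values_alt (dataset : List (List String)) : List String :=
  let freq : PySem.Dict String Int :=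
    dataset.foldl (fun d item =>
      d.insert (PySem.List.pyGetD item 0 "") (d.getD (PySem.List.pyGetD item 0 "") 0 + 1))
      PySem.Dict.empty
  let buckets : PySem.Dict Int (List String) :=
    freq.items.foldl (fun b p => b.modify p.2 [] (fun l => l ++ [p.1])) PySem.Dict.empty
  let counts := PySem.List.sorted buckets.keys (fun c => c) true
  counts.foldl (fun res c => res ++ PySem.List.sorted (buckets.getD c []) (fun v => v)) []

-- ===== PRECONDITION & SPEC =====
-- Pre_ excludes datasets containing an empty row: there Python A raises IndexError on item[0].
def Pre_sort_unique_values (dataset : List (List String)) : Prop :=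
  ∀ item ∈ dataset, item ≠ []
instance (dataset : List (List String)) : Decidable (Pre_sort_unique_values dataset) := by
  unfold Pre_sort_unique_values; infer_instance
def pvWitness_sort_unique_values : List (List String) := [["a", "1"], ["b", "2"], ["a", "3"]]

def Spec_sort_unique_values (dataset : List (List String)) (out : List String) : Prop :=
  out = sort_unique_values_alt dataset
instance (dataset : List (List String)) (out : List String) :
    Decidable (Spec_sort_unique_values dataset out) := by
  unfold Spec_sort_unique_values; infer_instance

-- ===== CLAIM (what is proved, stated in full; the proofs are below) =====
def Claim_equal_sort_unique_values : Prop :=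
  ∀ (dataset : List (List String)), Dom_sort_unique_values dataset →
    Pre_sort_unique_values dataset →
    Spec_sort_unique_values dataset (sort_unique_values dataset)

-- ===== LEMMAS AND PROOFS =====

-- the list of first entries both counting loops run over
def pvVals (dataset : List (List String)) : List String :=
  dataset.map (fun item => PySem.List.pyGetD item 0 "")

lemma pvCountA (dataset : List (List String)) :
    dataset.foldl (fun d item =>
      if d.contains (PySem.List.pyGetD item 0 "") then
        d.insert (PySem.List.pyGetD item 0 "") (d.getD (PySem.List.pyGetD item 0 "") 0 + 1)
      else
        d.insert (PySem.List.pyGetD item 0 "") 1) PySem.Dict.empty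
    = PySem.Dict.counter (pvVals dataset) := by
  rw [pvVals, ← PySem.Dict.foldl_insert_getD_add_one_eq_counter, List.foldl_map]
  congr 1
  funext d item
  by_cases h : d.contains (PySem.List.pyGetD item 0 "")
  · simp [h]
  · simp only [h, Bool.false_eq_true, if_false]
    rw [PySem.Dict.getD_of_not_contains _ _ (by simpa using h), zero_add]

lemma pvCountB (dataset : List (List String)) :
    dataset.foldl (fun d item =>
      d.insert (PySem.List.pyGetD item 0 "") (d.getD (PySem.List.pyGetD item 0 "") 0 + 1))
      PySem.Dict.empty
    = PySem.Dict.counter (pvVals dataset) := by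
  rw [pvVals, ← PySem.Dict.foldl_insert_getD_add_one_eq_counter, List.foldl_map]

-- A's tuple-key sort is the plain sort under the lexicographic key
lemma pvSorted2_lex (xs : List String) (c : String → Int) :
    PySem.List.sorted2 xs (fun k => -(c k)) (fun k => k) =
    PySem.List.sorted xs (fun k => toLex (-(c k), k)) := by
  have hcmp : (fun (a b : String) =>
        decide ((-(c a)) < (-(c b))) || (!decide ((-(c b)) < (-(c a))) && decide (a < b)))
      = (fun (a b : String) => decide (toLex ((-(c a)), a) < toLex ((-(c b)), b))) := by
    funext a b
    rcases lt_trichotomy (-(c a)) (-(c b)) with h | h | h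
    · simp [Prod.Lex.lt_iff, h]
    · simp [Prod.Lex.lt_iff, h]
    · simp [Prod.Lex.lt_iff, h, not_lt.mpr h.le, h.ne']
  calc PySem.List.sorted2 xs (fun k => -(c k)) (fun k => k)
      = List.foldl (fun acc x => PySem.List.insertBy (fun a b =>
          decide ((-(c a)) < (-(c b))) || (!decide ((-(c b)) < (-(c a))) && decide (a < b))) x acc) [] xs := rfl
    _ = List.foldl (fun acc x => PySem.List.insertBy (fun a b =>
          decide (toLex ((-(c a)), a) < toLex ((-(c b)), b))) x acc) [] xs := by rw [hcmp]
    _ = PySem.List.sorted xs (fun k => toLex (-(c k), k)) := rfl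

-- a nodup list of bucket labels whose buckets cover K partitions K
lemma pvPartition {α : Type} (f : α → Int) :
    ∀ (cs : List Int) (K : List α), cs.Nodup → (∀ k ∈ K, f k ∈ cs) →
      (cs.flatMap (fun c => K.filter (fun k => f k == c))).Perm K := by
  intro cs
  induction cs with
  | nil =>
    intro K _ h
    have hK : K = [] := by
      cases K with
      | nil => rfl
      | cons a t => exact absurd (h a (by simp)) (by simp)
    simp [hK]
  | cons c rest ih =>
    intro K hnd h
    have hcr : c ∉ rest := (List.nodup_cons.mp hnd).1
    have hrest :
        rest.flatMap (fun c' => K.filter (fun k => f k == c'))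
          = rest.flatMap (fun c' => (K.filter (fun k => !(f k == c))).filter (fun k => f k == c')) := by
      refine List.flatMap_congr ?_
      intro c' hc'
      rw [List.filter_filter]
      refine (List.filter_congr ?_).symm
      intro k _
      have : f k == c' → ¬ (f k == c) := by
        intro h1 h2
        exact hcr (((eq_of_beq h1).symm.trans (eq_of_beq h2)) ▸ hc')
      cases h1 : (f k == c') with
      | false => simp
      | true => simp [this h1]
    have hsub : ∀ k ∈ K.filter (fun k => !(f k == c)), f k ∈ rest := by
      intro k hk
      have hm := List.mem_filter.mp hk
      have := h k hm.1
      simp only [List.mem_cons] at this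
      rcases this with h' | h'
      · exact absurd (beq_iff_eq.mpr h') (by simpa using hm.2)
      · exact h'
    have ihr := ih (K.filter (fun k => !(f k == c))) (List.nodup_cons.mp hnd).2 hsub
    have heq : ((c :: rest).flatMap (fun c' => K.filter (fun k => f k == c')))
        = K.filter (fun k => f k == c)
          ++ rest.flatMap (fun c' => (K.filter (fun k => !(f k == c))).filter (fun k => f k == c')) := by
      rw [List.flatMap_cons, hrest]
    rw [heq]
    exact (List.Perm.append_left _ ihr).trans (List.filter_append_perm _ K)

-- B's intermediate buckets dictionary, as built from the counter's items
def pvBuckets (V : List String) : PySem.Dict Int (List String) :=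
  (PySem.Dict.counter V).items.foldl (fun b p => b.modify p.2 [] (fun l => l ++ [p.1]))
    PySem.Dict.empty

lemma pvBuckets_swap (V : List String) :
    pvBuckets V = ((PySem.Dict.counter V).items.map Prod.swap).foldl
      (fun b q => b.modify q.1 [] (fun l => l ++ [q.2])) PySem.Dict.empty := by
  unfold pvBuckets
  rw [List.foldl_map]
  rfl

lemma pvItems_swap (V : List String) :
    (PySem.Dict.counter V).items.map Prod.swap
      = (PySem.Set.ofList V).map (fun k => ((V.count k : Int), k)) := by
  rw [PySem.Dict.items_counter, List.map_map]
  rfl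

lemma pvBuckets_getD (V : List String) (c : Int) :
    (pvBuckets V).getD c []
      = (PySem.Set.ofList V).filter (fun k => (V.count k : Int) == c) := by
  rw [pvBuckets_swap, pvItems_swap, PySem.Dict.getD_foldl_modify_append, PySem.Dict.getD_empty,
    List.nil_append, List.filter_map, List.map_map]
  have h1 : ((fun (x : Int × String) => x.2) ∘ fun k => ((V.count k : Int), k)) = id := rfl
  have h2 : ((fun (p : Int × String) => p.1 == c) ∘ fun k => ((V.count k : Int), k))
      = fun k => (V.count k : Int) == c := rfl
  rw [h1, h2, List.map_id]

lemma pvBuckets_keys (V : List String) :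
    (pvBuckets V).keys
      = PySem.Set.ofList ((PySem.Set.ofList V).map (fun k => (V.count k : Int))) := by
  rw [pvBuckets_swap, pvItems_swap, PySem.Dict.keys_foldl_modify_key, PySem.Dict.keys_empty,
    PySem.Set.update_nil_left, List.map_map]
  rfl

-- elements of a sorted bucket have exactly that count
lemma pvMem_bucket (V : List String) (c : Int) (x : String)
    (hx : x ∈ PySem.List.sorted ((pvBuckets V).getD c []) (fun v => v)) :
    (V.count x : Int) = c := by
  rw [PySem.List.mem_sorted, pvBuckets_getD] at hx
  exact beq_iff_eq.mp (List.mem_filter.mp hx).2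

theorem pvMain (V : List String) :
    PySem.List.sorted2 (PySem.Dict.counter V).keys
      (fun k => -((PySem.Dict.counter V).getD k 0)) (fun k => k)
    = (PySem.List.sorted (pvBuckets V).keys (fun c => c) true).foldl
        (fun res c => res ++ PySem.List.sorted ((pvBuckets V).getD c []) (fun v => v)) [] := by
  have hKnd : (PySem.Set.ofList V).Nodup := PySem.Set.nodup_ofList V
  have hkeyA : (fun k => -((PySem.Dict.counter V).getD k 0))
      = fun k => -((V.count k : Int)) := by
    funext k; rw [PySem.Dict.getD_counter]
  rw [PySem.Dict.keys_counter, hkeyA, pvSorted2_lex,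
    PySem.List.foldl_append_eq_flatMap, List.nil_append]
  have hbkeysnd : (pvBuckets V).keys.Nodup := by
    rw [pvBuckets_keys]; exact PySem.Set.nodup_ofList _
  have hcperm : (PySem.List.sorted (pvBuckets V).keys (fun c => c) true).Perm (pvBuckets V).keys :=
    PySem.List.sorted_perm _ _ _
  have hcnd : (PySem.List.sorted (pvBuckets V).keys (fun c => c) true).Nodup :=
    hcperm.symm.nodup hbkeysnd
  have hcdesc : (PySem.List.sorted (pvBuckets V).keys (fun c => c) true).Pairwise
      (fun a b => b < a) := by
    have h1 := PySem.List.sorted_pairwise_rev (pvBuckets V).keys (fun c => c)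
    have h2 : (PySem.List.sorted (pvBuckets V).keys (fun c => c) true).Pairwise
        (fun a b => a ≠ b) := List.Pairwise.imp (fun h => h) hcnd
    exact (h1.and h2).imp (fun h => lt_of_le_of_ne h.1 (fun hba => h.2 hba.symm))
  refine PySem.List.sorted_eq_of_perm_of_pairwise_lt _ _ _ ?_ ?_
  · -- the flattened buckets are a permutation of the distinct values
    have h1 : ((PySem.List.sorted (pvBuckets V).keys (fun c => c) true).flatMap
          (fun c => PySem.List.sorted ((pvBuckets V).getD c []) (fun v => v))).Perm
        ((PySem.List.sorted (pvBuckets V).keys (fun c => c) true).flatMap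
          (fun c => (PySem.Set.ofList V).filter (fun k => (V.count k : Int) == c))) := by
      refine List.Perm.flatMap_left _ ?_
      intro c _
      rw [pvBuckets_getD V c]
      exact PySem.List.sorted_perm _ _ _
    refine h1.trans (pvPartition (fun k => (V.count k : Int)) _ _ hcnd ?_)
    intro k hk
    rw [PySem.List.mem_sorted, pvBuckets_keys, PySem.Set.mem_ofList]
    exact List.mem_map_of_mem hk
  · -- strictly increasing lexicographic key across the flattened buckets
    rw [List.pairwise_flatMap]
    constructor
    · intro c _
      have hnd : (PySem.List.sorted ((pvBuckets V).getD c []) (fun v => v)).Nodup := by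
        refine (PySem.List.sorted_perm _ _ _).symm.nodup ?_
        rw [pvBuckets_getD]
        exact hKnd.filter _
      have hle := PySem.List.sorted_pairwise ((pvBuckets V).getD c []) (fun v => v)
      have hlt : (PySem.List.sorted ((pvBuckets V).getD c []) (fun v => v)).Pairwise
          (fun a b => a < b) :=
        (hle.and (List.Pairwise.imp (fun h => h) hnd)).imp
          (fun h => lt_of_le_of_ne h.1 h.2)
      refine hlt.imp_of_mem ?_
      intro a b ha hb hab
      rw [Prod.Lex.lt_iff]
      right
      exact ⟨by simp [pvMem_bucket V c a ha, pvMem_bucket V c b hb], hab⟩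
    · refine hcdesc.imp_of_mem ?_
      intro c c' _ _ hlt x hx y hy
      have hcx := pvMem_bucket V c x hx
      have hcy := pvMem_bucket V c' y hy
      rw [Prod.Lex.lt_iff]
      left
      simp only [ofLex_toLex]
      rw [hcx, hcy]
      omega

theorem sort_unique_values_eq_alt (dataset : List (List String)) :
    sort_unique_values dataset = sort_unique_values_alt dataset := by
  unfold sort_unique_values sort_unique_values_alt
  dsimp only
  rw [pvCountA, pvCountB]
  exact pvMain (pvVals dataset)

-- ===== VERDICT (by name: the statement is the Claim_ definition above) =====
theorem sort_unique_values_spec : Claim_equal_sort_unique_values := by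
  intro dataset _ _
  unfold Spec_sort_unique_values
  exact sort_unique_values_eq_alt dataset
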